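-- pv_equiv track=rewrite | github.com/mhmughees/CS538 | main.py | Edge_Tran
-- ===== SOURCE A (Python) =====
-- def Edge_Tran(D,E):
--     E_Cost={}
--     for e in E:
--         E_Cost[e]=[]
--         for d in D:
--             m=d[1]
--             t=[(m[i],m[i+1]) for i in range(len(m)-1)]
--
--             if e in t:
--                     E_Cost[e].append(d)
--
--     return E_Cost
-- ===== SOURCE B (Python) =====
-- def Edge_Tran(D, E):
--     res = {e: [] for e in E}
--     for d in D:
--         m = d[1]
--         for p in dict.fromkeys((m[i], m[i + 1]) for i in range(len(m) - 1)):
--             if p in res: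
--                 res[p].append(d)
--     return res
-- ===== Notes on version B (the rewrite author's own statement) =====
-- stated objective: faster
-- what changed: Instead of rescanning all of D and rebuilding every path's edge list for each edge of E, B builds the edge-to-[] dict once and makes a single pass over D, appending each path to the entries of its (deduplicated) consecutive pairs via dict indexing.
import Mathlib
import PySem

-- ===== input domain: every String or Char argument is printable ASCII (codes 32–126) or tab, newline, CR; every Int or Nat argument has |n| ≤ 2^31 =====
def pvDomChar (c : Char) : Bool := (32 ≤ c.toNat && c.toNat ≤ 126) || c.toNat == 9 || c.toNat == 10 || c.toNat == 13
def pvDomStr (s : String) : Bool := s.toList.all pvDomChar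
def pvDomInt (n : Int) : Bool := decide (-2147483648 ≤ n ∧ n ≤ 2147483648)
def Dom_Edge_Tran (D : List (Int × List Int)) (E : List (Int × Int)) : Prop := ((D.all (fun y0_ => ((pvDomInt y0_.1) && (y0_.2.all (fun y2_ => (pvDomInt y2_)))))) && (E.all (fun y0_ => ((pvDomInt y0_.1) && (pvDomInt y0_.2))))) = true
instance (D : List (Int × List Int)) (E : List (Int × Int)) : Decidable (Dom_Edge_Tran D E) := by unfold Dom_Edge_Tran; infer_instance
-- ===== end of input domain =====

-- B replaces A's per-edge rescan of all paths by one dict of edge → list built once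
-- and a single pass over the paths (asymptotically faster; return value proved equal).

-- both Pythons compute t = [(m[i], m[i+1]) for i in range(len(m)-1)]; indices i, i+1
-- are always in range there, so pyGetD with a dummy default is exact.
def pvPairs (m : List Int) : List (Int × Int) :=
  (PySem.List.pyRange 0 ((m.length : Int) - 1) 1).map
    (fun i => (PySem.List.pyGetD m i 0, PySem.List.pyGetD m (i + 1) 0))

-- the dict key is the pair e = (a, b); the required result type flattens ((a,b),v) to (a,b,v)
def pvFlat (p : (Int × Int) × List (Int × List Int)) : Int × Int × List (Int × List Int) :=
  (p.1.1, p.1.2, p.2)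

-- ===== PORT A =====
def Edge_Tran (D : List (Int × List Int)) (E : List (Int × Int)) : List (Int × Int × List (Int × List Int)) :=
  ((E.foldl (fun cost e =>
      D.foldl (fun cost2 d =>
        if e ∈ pvPairs d.2 then cost2.modify e [] (· ++ [d]) else cost2)
        (cost.insert e []))
    (PySem.Dict.empty : PySem.Dict (Int × Int) (List (Int × List Int))))).items.map pvFlat

-- ===== PORT B =====
def Edge_Tran_alt (D : List (Int × List Int)) (E : List (Int × Int)) : List (Int × Int × List (Int × List Int)) :=
  let res0 : PySem.Dict (Int × Int) (List (Int × List Int)) :=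
    E.foldl (fun r e => r.insert e []) PySem.Dict.empty
  ((D.foldl (fun r d =>
      (PySem.List.dedup (pvPairs d.2)).foldl (fun r2 p =>
        if r2.contains p then r2.modify p [] (· ++ [d]) else r2) r)
    res0)).items.map pvFlat

-- ===== PRECONDITION & SPEC =====
def Spec_Edge_Tran (D : List (Int × List Int)) (E : List (Int × Int)) (out : List (Int × Int × List (Int × List Int))) : Prop := out = Edge_Tran_alt D E
instance (D : List (Int × List Int)) (E : List (Int × Int)) (out : List (Int × Int × List (Int × List Int))) : Decidable (Spec_Edge_Tran D E out) := by unfold Spec_Edge_Tran; infer_instance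

-- ===== CLAIM (what is proved, stated in full; the proofs are below) =====
def Claim_equal_Edge_Tran : Prop := ∀ (D : List (Int × List Int)) (E : List (Int × Int)), Dom_Edge_Tran D E → Spec_Edge_Tran D E (Edge_Tran D E)

-- ===== LEMMAS AND PROOFS =====

-- A's inner loop over D at edge e: value at e grows by the filtered paths, other keys untouched
theorem pvA_inner_getD (D : List (Int × List Int)) (e k : Int × Int)
    (dc : PySem.Dict (Int × Int) (List (Int × List Int))) :
    (D.foldl (fun cost2 d =>
        if e ∈ pvPairs d.2 then cost2.modify e [] (· ++ [d]) else cost2) dc).getD k []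
      = if k = e then dc.getD e [] ++ D.filter (fun d => decide (e ∈ pvPairs d.2)) else dc.getD k [] := by
  induction D generalizing dc with
  | nil => simp only [List.foldl_nil, List.filter_nil, List.append_nil]; split <;> simp_all
  | cons d rest ih =>
    simp only [List.foldl_cons, List.filter_cons, ih]
    by_cases hm : e ∈ pvPairs d.2 <;> by_cases hk : k = e <;>
      simp [hm, hk, PySem.Dict.getD_modify]

-- A's inner loop preserves the key list (e is already a key)
theorem pvA_inner_keys (D : List (Int × List Int)) (e : Int × Int)
    (dc : PySem.Dict (Int × Int) (List (Int × List Int))) (hc : dc.contains e = true) :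
    (D.foldl (fun cost2 d =>
        if e ∈ pvPairs d.2 then cost2.modify e [] (· ++ [d]) else cost2) dc).keys = dc.keys := by
  induction D generalizing dc with
  | nil => rfl
  | cons d rest ih =>
    simp only [List.foldl_cons]
    by_cases hm : e ∈ pvPairs d.2
    · simp only [hm, if_pos]
      rw [ih _ (by simp [PySem.Dict.contains_modify, hc]), PySem.Dict.keys_modify,
        PySem.Dict.keys_insert_of_contains _ _ hc]
    · simp [hm, ih _ hc]

-- A's outer loop and B's initialisation build the same key list
theorem pvA_keys (E : List (Int × Int)) (D : List (Int × List Int))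
    (dc1 dc2 : PySem.Dict (Int × Int) (List (Int × List Int))) (h : dc1.keys = dc2.keys) :
    (E.foldl (fun cost e =>
        D.foldl (fun cost2 d =>
          if e ∈ pvPairs d.2 then cost2.modify e [] (· ++ [d]) else cost2)
          (cost.insert e [])) dc1).keys
      = (E.foldl (fun r e => r.insert e []) dc2).keys := by
  induction E generalizing dc1 dc2 with
  | nil => simpa using h
  | cons e rest ih =>
    simp only [List.foldl_cons]
    apply ih
    rw [pvA_inner_keys _ _ _ (PySem.Dict.contains_insert_self _ _ _)]
    have hc : dc1.contains e = dc2.contains e := by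
      simp [PySem.Dict.contains_eq_decide_mem_keys, h]
    by_cases hce : dc1.contains e = true
    · rw [PySem.Dict.keys_insert_of_contains _ _ hce,
        PySem.Dict.keys_insert_of_contains _ _ (hc ▸ hce), h]
    · rw [PySem.Dict.keys_insert_of_not_contains _ _ (by simpa using hce),
        PySem.Dict.keys_insert_of_not_contains _ _ (by rw [← hc]; simpa using hce), h]

-- A's outer loop: the final value at a key of E is the filtered path list
theorem pvA_getD (E : List (Int × Int)) (D : List (Int × List Int)) (k : Int × Int)
    (dc : PySem.Dict (Int × Int) (List (Int × List Int))) :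
    (E.foldl (fun cost e =>
        D.foldl (fun cost2 d =>
          if e ∈ pvPairs d.2 then cost2.modify e [] (· ++ [d]) else cost2)
          (cost.insert e [])) dc).getD k []
      = if k ∈ E then D.filter (fun d => decide (k ∈ pvPairs d.2)) else dc.getD k [] := by
  induction E generalizing dc with
  | nil => simp
  | cons e rest ih =>
    simp only [List.foldl_cons, ih, pvA_inner_getD, List.mem_cons]
    by_cases hr : k ∈ rest <;> by_cases hk : k = e <;>
      simp [hr, hk, PySem.Dict.getD_insert]

-- B's initial dict maps everything to []
theorem pvB_init_getD (E : List (Int × Int)) (k : Int × Int)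
    (dc : PySem.Dict (Int × Int) (List (Int × List Int))) (h : ∀ k', dc.getD k' [] = []) :
    (E.foldl (fun r e => r.insert e []) dc).getD k [] = [] := by
  induction E generalizing dc with
  | nil => exact h k
  | cons e rest ih =>
    simp only [List.foldl_cons]
    apply ih
    intro k'
    rw [PySem.Dict.getD_insert]
    split <;> simp [h]

-- B's inner loop over a duplicate-free pair list: keys preserved, existing hit keys gain d
theorem pvB_pair_keys (ps : List (Int × Int)) (d : Int × List Int)
    (dc : PySem.Dict (Int × Int) (List (Int × List Int))) :
    (ps.foldl (fun r2 p =>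
        if r2.contains p then r2.modify p [] (· ++ [d]) else r2) dc).keys = dc.keys := by
  induction ps generalizing dc with
  | nil => rfl
  | cons p rest ih =>
    simp only [List.foldl_cons]
    by_cases hc : dc.contains p = true
    · simp only [hc, if_pos]
      rw [ih, PySem.Dict.keys_modify, PySem.Dict.keys_insert_of_contains _ _ hc]
    · simp [hc, ih]

theorem pvB_pair_getD (ps : List (Int × Int)) (d : Int × List Int) (k : Int × Int)
    (dc : PySem.Dict (Int × Int) (List (Int × List Int))) (hnd : ps.Nodup) :
    (ps.foldl (fun r2 p =>
        if r2.contains p then r2.modify p [] (· ++ [d]) else r2) dc).getD k []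
      = if k ∈ ps ∧ dc.contains k = true then dc.getD k [] ++ [d] else dc.getD k [] := by
  induction ps generalizing dc with
  | nil => simp
  | cons p rest ih =>
    have hnd' := hnd
    simp only [List.nodup_cons] at hnd'
    simp only [List.foldl_cons, ih _ hnd'.2, List.mem_cons]
    have hck : ∀ (r2 : PySem.Dict (Int × Int) (List (Int × List Int))),
        (if r2.contains p then r2.modify p [] (· ++ [d]) else r2).contains k = r2.contains k := by
      intro r2
      by_cases h : r2.contains p = true
      · simp only [h, if_pos, PySem.Dict.contains_modify]
        by_cases hkp : k = p
        · subst hkp; simp [h]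
        · simp [hkp]
      · simp [h]
    rw [hck]
    by_cases hk : k = p
    · subst hk
      have hkr : k ∉ rest := hnd'.1
      by_cases hc : dc.contains k = true <;>
        simp [hc, hkr, PySem.Dict.getD_modify_self]
    · have : (if dc.contains p then dc.modify p [] (· ++ [d]) else dc).getD k [] = dc.getD k [] := by
        split
        · exact PySem.Dict.getD_modify_of_ne _ _ _ hk
        · rfl
      simp [this, hk]

-- B's pass over D: keys preserved
theorem pvB_keys (D : List (Int × List Int))
    (dc : PySem.Dict (Int × Int) (List (Int × List Int))) :
    (D.foldl (fun r d =>
        (PySem.List.dedup (pvPairs d.2)).foldl (fun r2 p =>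
          if r2.contains p then r2.modify p [] (· ++ [d]) else r2) r) dc).keys = dc.keys := by
  induction D generalizing dc with
  | nil => rfl
  | cons d rest ih => simp only [List.foldl_cons]; rw [ih, pvB_pair_keys]

-- B's pass over D: each existing key accumulates exactly the paths containing it
theorem pvB_getD (D : List (Int × List Int)) (k : Int × Int)
    (dc : PySem.Dict (Int × Int) (List (Int × List Int))) (hc : dc.contains k = true) :
    (D.foldl (fun r d =>
        (PySem.List.dedup (pvPairs d.2)).foldl (fun r2 p =>
          if r2.contains p then r2.modify p [] (· ++ [d]) else r2) r) dc).getD k []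
      = dc.getD k [] ++ D.filter (fun d => decide (k ∈ pvPairs d.2)) := by
  induction D generalizing dc with
  | nil => simp
  | cons d rest ih =>
    have hc' : (((PySem.List.dedup (pvPairs d.2)).foldl (fun r2 p =>
        if r2.contains p then r2.modify p [] (· ++ [d]) else r2) dc)).contains k = true := by
      rw [PySem.Dict.contains_eq_decide_mem_keys, pvB_pair_keys,
        ← PySem.Dict.contains_eq_decide_mem_keys]; exact hc
    simp only [List.foldl_cons, List.filter_cons, ih _ hc',
      pvB_pair_getD _ _ _ _ (PySem.List.nodup_dedup _), PySem.List.mem_dedup]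
    by_cases hm : k ∈ pvPairs d.2 <;> simp [hm, hc]

-- ===== VERDICT (by name: the statement is the Claim_ definition above) =====
theorem Edge_Tran_spec : Claim_equal_Edge_Tran := by
  intro D E _
  show Edge_Tran D E = Edge_Tran_alt D E
  unfold Edge_Tran Edge_Tran_alt
  congr 1
  set init : PySem.Dict (Int × Int) (List (Int × List Int)) :=
    E.foldl (fun r e => r.insert e []) PySem.Dict.empty with hinit
  have hkeysA := pvA_keys E D PySem.Dict.empty PySem.Dict.empty rfl
  have hkeysB := pvB_keys D init
  have hndinit : init.keys.Nodup := PySem.Dict.nodup_keys_foldl_insert _ _ _ (by simp)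
  rw [PySem.Dict.items_eq_map_keys _ (by rw [hkeysA]; exact hndinit) [],
      PySem.Dict.items_eq_map_keys _ (by rw [hkeysB]; exact hndinit) [],
      hkeysA, hkeysB]
  apply List.map_congr_left
  intro k hk
  have hkE : k ∈ E := by
    rw [PySem.Dict.keys_foldl_insert E (fun _ _ => ([] : List (Int × List Int)))
      PySem.Dict.empty] at hk
    simpa [PySem.Set.update_nil_left, PySem.Set.mem_ofList] using hk
  have hcinit : init.contains k = true := by
    rw [PySem.Dict.contains_eq_decide_mem_keys]; simpa using hk
  rw [pvA_getD, pvB_getD _ _ _ hcinit, pvB_init_getD _ _ _ (by simp), if_pos hkE]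
  simp
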